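-- pv_equiv track=rewrite | github.com/krastykovyaz/yandex_train | prefix_sum_zero.py | prefix_zero
-- ===== SOURCE A (Python) =====
-- def prefix_zero(arr):
--     pref = 0
--     pref_zeros = [0]
--     for i in range(1, len(arr)):
--         if arr[i-1] == 0:
--             pref += 1
--         pref_zeros.append(pref)
--     return pref_zeros
-- ===== SOURCE B (Python) =====
-- def prefix_zero(arr):
--     return [sum(1 for x in arr[:i] if x == 0) for i in range(len(arr))]
-- ===== Notes on version B (the rewrite author's own statement) =====
-- stated objective: alternative
-- what changed: Replaces the running-counter accumulation loop with a comprehension that recomputes each prefix's zero count by a fresh scan of arr[:i]; Pre_ excludes the empty list, where A returns a singleton zero list (the accumulator's seed) while B naturally returns an empty list.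
-- outside the precondition, e.g. on prefix_zero([]): A returns [0], B returns []
import Mathlib
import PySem

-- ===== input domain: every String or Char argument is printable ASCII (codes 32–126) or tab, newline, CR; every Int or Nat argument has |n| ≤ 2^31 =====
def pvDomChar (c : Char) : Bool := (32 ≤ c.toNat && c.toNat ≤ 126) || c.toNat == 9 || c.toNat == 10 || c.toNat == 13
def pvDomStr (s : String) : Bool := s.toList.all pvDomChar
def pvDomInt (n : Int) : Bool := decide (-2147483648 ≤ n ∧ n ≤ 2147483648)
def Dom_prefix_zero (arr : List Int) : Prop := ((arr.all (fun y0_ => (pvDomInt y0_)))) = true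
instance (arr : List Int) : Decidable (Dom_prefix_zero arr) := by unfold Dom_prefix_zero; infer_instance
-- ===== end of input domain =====

-- B recomputes each prefix's zero count from scratch instead of accumulating a running counter
-- (alternative decomposition, not faster; Pre_ excludes only the empty list).

-- ===== PORT A =====
def prefix_zero (arr : List Int) : List Int :=
  -- pref = 0; pref_zeros = [0]; for i in range(1, len(arr)): if arr[i-1]==0: pref+=1; append(pref)
  let st := (PySem.List.pyRange 1 (arr.length : Int) 1).foldl
    (fun (st : Int × List Int) i =>
      let pref := if PySem.List.pyGetD arr (i - 1) 0 = 0 then st.1 + 1 else st.1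
      (pref, st.2 ++ [pref])) (0, [0])
  st.2

-- ===== PORT B =====
def prefix_zero_alt (arr : List Int) : List Int :=
  -- [sum(1 for x in arr[:i] if x == 0) for i in range(len(arr))]
  (PySem.List.pyRange 0 (arr.length : Int) 1).map (fun i =>
    (PySem.List.slice arr none (some i)).foldl (fun a x => if x = 0 then a + 1 else a) 0)

-- ===== PRECONDITION & SPEC =====
-- Pre_ excludes the empty list, a corner where A returns a singleton zero list (its
-- accumulator's seed, never touched by the loop) while B's comprehension naturally returns
-- an empty list; both are defensible.
def Pre_prefix_zero (arr : List Int) : Prop := arr ≠ []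
instance (arr : List Int) : Decidable (Pre_prefix_zero arr) := by unfold Pre_prefix_zero; infer_instance
def pvWitness_prefix_zero : List Int := [0, 3, 0]
def Spec_prefix_zero (arr : List Int) (out : List Int) : Prop := out = prefix_zero_alt arr
instance (arr : List Int) (out : List Int) : Decidable (Spec_prefix_zero arr out) := by unfold Spec_prefix_zero; infer_instance

-- ===== CLAIM (what is proved, stated in full; the proofs are below) =====
def Claim_equal_prefix_zero : Prop := ∀ (arr : List Int), Dom_prefix_zero arr → Pre_prefix_zero arr → Spec_prefix_zero arr (prefix_zero arr)

-- ===== LEMMAS AND PROOFS =====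

-- zero count of a list, as both ports' inner folds compute it
def pvCnt (l : List Int) : Int := l.foldl (fun a x => if x = 0 then a + 1 else a) 0

lemma pvCnt_take_succ (arr : List Int) (m : Nat) (hm : m < arr.length) :
    pvCnt (arr.take (m + 1)) =
      if arr[m] = 0 then pvCnt (arr.take m) + 1 else pvCnt (arr.take m) := by
  have h : arr.take (m + 1) = arr.take m ++ [arr[m]] := List.take_succ_eq_append_getElem hm
  rw [pvCnt, h, List.foldl_append]
  simp [pvCnt]

-- A's loop state after processing i = 1 .. m-1
lemma prefix_zero_loop (arr : List Int) (m : Nat) (h1 : 1 ≤ m) (h2 : m ≤ arr.length) :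
    (PySem.List.pyRange 1 (m : Int) 1).foldl
      (fun (st : Int × List Int) i =>
        let pref := if PySem.List.pyGetD arr (i - 1) 0 = 0 then st.1 + 1 else st.1
        (pref, st.2 ++ [pref])) (0, [0])
    = (pvCnt (arr.take (m - 1)), (List.range m).map (fun k => pvCnt (arr.take k))) := by
  induction m with
  | zero => omega
  | succ m ih =>
    by_cases hm : 1 ≤ m
    · have hrange : PySem.List.pyRange 1 ((m + 1 : Nat) : Int) 1
          = PySem.List.pyRange 1 (m : Int) 1 ++ [(m : Int)] := by
        have := PySem.List.pyRange_one_succ_right (show (1:Int) ≤ (m:Int) by exact_mod_cast hm)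
        simpa using this
      have hmlt : m < arr.length := by omega
      have hget : PySem.List.pyGetD arr ((m : Int) - 1) 0 = arr[m - 1] := by
        have h' : ((m : Int) - 1) = ((m - 1 : Nat) : Int) := by omega
        rw [h']
        simp only [PySem.List.pyGetD_natCast]
        rw [List.getD_eq_getElem arr 0 (show m - 1 < arr.length by omega)]
      rw [hrange, List.foldl_append, ih hm (by omega)]
      have htake : m - 1 + 1 = m := by omega
      have hc := pvCnt_take_succ arr (m - 1) (by omega)
      rw [htake] at hc
      simp only [List.foldl_cons, List.foldl_nil, hget, Nat.add_sub_cancel, List.range_succ,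
        List.map_append, List.map_cons, List.map_nil, ← hc]
    · have hm0 : m = 0 := by omega
      subst hm0
      simp [pvCnt]

lemma prefix_zero_alt_eq (arr : List Int) :
    prefix_zero_alt arr = (List.range arr.length).map (fun k => pvCnt (arr.take k)) := by
  unfold prefix_zero_alt
  rw [PySem.List.pyRange_zero_nat, List.map_map]
  apply List.map_congr_left
  intro k _
  simp [PySem.List.slice_to, pvCnt]

-- ===== VERDICT (by name: the statement is the Claim_ definition above) =====
theorem prefix_zero_spec : Claim_equal_prefix_zero := by
  intro arr _ hpre
  show prefix_zero arr = prefix_zero_alt arr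
  rw [prefix_zero_alt_eq]
  unfold prefix_zero
  have h : 1 ≤ arr.length := by
    cases arr with
    | nil => exact absurd rfl hpre
    | cons a l => simp
  rw [prefix_zero_loop arr arr.length h le_rfl]
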